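-- pv_equiv track=rewrite | github.com/thekidder/adventofcode | 2023/day25/solution.py | exists_in
-- ===== SOURCE A (Python) =====
-- def exists_in(groups, graph, cmpt):
--     idxes = []
--     for i, g in enumerate(groups):
--         if cmpt in g:
--             idxes.append(i)
--         for h in graph[cmpt]:
--             if h in g and i not in idxes:
--                 idxes.append(i)
--     return idxes
-- ===== SOURCE B (Python) =====
-- def exists_in(groups, graph, cmpt):
--     if not groups:
--         return []
--     index = {}
--     for i, g in enumerate(groups):
--         for node in g:
--             index.setdefault(node, set()).add(i)
--     hits = set(index.get(cmpt, ()))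
--     for h in graph[cmpt]:
--         hits |= index.get(h, set())
--     return sorted(hits)
-- ===== Notes on version B (the rewrite author's own statement) =====
-- stated objective: faster
-- what changed: B builds an inverted index node->set(group indices) in one staged pass over the groups, then answers by unioning the index entries for cmpt and its neighbors and sorting, instead of A's per-group rescan of the whole neighbor list with an incremental `i not in idxes` dedup guard (B guards the empty-groups case, where A never touches graph[cmpt], with an early return).
import Mathlib
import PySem

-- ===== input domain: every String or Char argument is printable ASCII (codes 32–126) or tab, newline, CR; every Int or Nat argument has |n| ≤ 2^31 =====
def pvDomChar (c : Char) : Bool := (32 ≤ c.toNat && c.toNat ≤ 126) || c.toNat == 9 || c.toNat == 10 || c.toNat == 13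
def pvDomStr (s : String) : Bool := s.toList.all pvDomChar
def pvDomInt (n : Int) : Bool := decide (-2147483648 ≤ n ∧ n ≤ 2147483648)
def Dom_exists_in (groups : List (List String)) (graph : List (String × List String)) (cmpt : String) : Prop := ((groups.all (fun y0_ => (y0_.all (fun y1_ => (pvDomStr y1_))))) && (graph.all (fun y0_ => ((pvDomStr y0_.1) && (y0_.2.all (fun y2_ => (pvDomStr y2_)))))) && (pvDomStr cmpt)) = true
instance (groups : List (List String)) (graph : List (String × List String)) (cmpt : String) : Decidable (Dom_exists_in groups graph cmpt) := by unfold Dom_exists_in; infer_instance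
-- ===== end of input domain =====

-- B builds an inverted index node -> set of group indices in one staged pass, then unions the
-- entries for cmpt and its neighbors and sorts, replacing A's per-group neighbor rescan.

-- ===== PORT A =====
-- graph[cmpt] on the association list: first matching key (getD [] is only taken outside Pre_)
def exists_in (groups : List (List String)) (graph : List (String × List String)) (cmpt : String) : List Int :=
  (PySem.List.enumerate groups).foldl
    (fun idxes ig =>
      let idxes := if ig.2.contains cmpt then idxes ++ [ig.1] else idxes
      ((graph.lookup cmpt).getD []).foldl
        (fun idxes h =>
          if ig.2.contains h && !(idxes.contains ig.1) then idxes ++ [ig.1] else idxes)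
        idxes)
    []

-- ===== PORT B =====
def exists_in_alt (groups : List (List String)) (graph : List (String × List String)) (cmpt : String) : List Int :=
  if groups.isEmpty then []
  else
    let index : PySem.Dict String (PySem.Set Int) :=
      (PySem.List.enumerate groups).foldl
        (fun d ig =>
          ig.2.foldl (fun d node => d.modify node PySem.Set.empty (fun s => PySem.Set.add s ig.1)) d)
        PySem.Dict.empty
    let hits0 : PySem.Set Int := PySem.Set.ofList (index.getD cmpt PySem.Set.empty)
    let hits : PySem.Set Int :=
      ((graph.lookup cmpt).getD []).foldl
        (fun s h => PySem.Set.union s (index.getD h PySem.Set.empty)) hits0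
    PySem.List.sorted hits (fun x => x) false

-- ===== PRECONDITION & SPEC =====
-- Pre_ excludes exactly the inputs where Python A raises KeyError: groups non-empty and cmpt not a key of graph.
def Pre_exists_in (groups : List (List String)) (graph : List (String × List String)) (cmpt : String) : Prop :=
  groups = [] ∨ (graph.lookup cmpt).isSome
instance (groups : List (List String)) (graph : List (String × List String)) (cmpt : String) : Decidable (Pre_exists_in groups graph cmpt) := by unfold Pre_exists_in; infer_instance
def pvWitness_exists_in : List (List String) × (List (String × List String)) × String :=
  ([["a", "b"], ["c"]], [("a", ["c"])], "a")

def Spec_exists_in (groups : List (List String)) (graph : List (String × List String)) (cmpt : String) (out : List Int) : Prop := out = exists_in_alt groups graph cmpt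
instance (groups : List (List String)) (graph : List (String × List String)) (cmpt : String) (out : List Int) : Decidable (Spec_exists_in groups graph cmpt out) := by unfold Spec_exists_in; infer_instance

-- ===== CLAIM (what is proved, stated in full; the proofs are below) =====
def Claim_equal_exists_in : Prop := ∀ (groups : List (List String)) (graph : List (String × List String)) (cmpt : String), Dom_exists_in groups graph cmpt → Pre_exists_in groups graph cmpt → Spec_exists_in groups graph cmpt (exists_in groups graph cmpt)

-- ===== LEMMAS AND PROOFS =====

-- A-side: the inner neighbor loop appends i once iff some neighbor is in g and i is not already there
theorem inner_loop_eq (nb g : List String) (i : Int) (acc : List Int) :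
    nb.foldl (fun acc h => if g.contains h && !(acc.contains i) then acc ++ [i] else acc) acc
      = if i ∈ acc then acc else if nb.any (fun h => g.contains h) then acc ++ [i] else acc := by
  induction nb generalizing acc with
  | nil =>
    rw [List.foldl_nil, List.any_nil]
    split_ifs with h1 h2
    · rfl
    · exact absurd h2 (by simp)
    · rfl
  | cons h t ih =>
    rw [List.foldl_cons]
    by_cases hm : i ∈ acc
    · have hc : acc.contains i = true := by simpa [List.contains_iff_mem] using hm
      rw [hc, Bool.not_true, Bool.and_false]
      rw [if_neg (by simp), ih, if_pos hm, if_pos hm]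
    · have hc : acc.contains i = false := by simpa [List.contains_iff_mem] using hm
      rw [hc, Bool.not_false, Bool.and_true]
      by_cases hg : g.contains h = true
      · rw [if_pos hg, ih, if_pos (show i ∈ acc ++ [i] by simp), if_neg hm,
          if_pos (show ((h :: t).any fun h => g.contains h) = true by rw [List.any_cons, hg, Bool.true_or])]
      · rw [if_neg hg, ih, if_neg hm, if_neg hm]
        have hg' : g.contains h = false := eq_false_of_ne_true hg
        rw [List.any_cons, hg', Bool.false_or]

-- A-side: one pass of the outer loop, for a fresh index i
theorem step_eq (nb g : List String) (cmpt : String) (i : Int) (acc : List Int) (hm : i ∉ acc) :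
    nb.foldl (fun acc h => if g.contains h && !(acc.contains i) then acc ++ [i] else acc)
        (if g.contains cmpt then acc ++ [i] else acc)
      = if (g.contains cmpt || nb.any (fun h => g.contains h)) then acc ++ [i] else acc := by
  by_cases hc : g.contains cmpt = true
  · rw [if_pos hc, inner_loop_eq, if_pos (show i ∈ acc ++ [i] by simp),
      if_pos (show (g.contains cmpt || nb.any fun h => g.contains h) = true by rw [hc, Bool.true_or])]
  · have hc' : g.contains cmpt = false := eq_false_of_ne_true hc
    rw [if_neg hc, inner_loop_eq, if_neg hm, hc', Bool.false_or]

-- A-side: A's whole loop equals a filterMap over the enumeration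
theorem outer_loop_eq (nb : List String) (cmpt : String) (gs : List (List String)) (s : Int)
    (acc : List Int) (hacc : ∀ j ∈ acc, j < s) :
    (PySem.List.enumerate gs s).foldl
        (fun idxes ig =>
          let idxes := if ig.2.contains cmpt then idxes ++ [ig.1] else idxes
          nb.foldl (fun idxes h =>
            if ig.2.contains h && !(idxes.contains ig.1) then idxes ++ [ig.1] else idxes) idxes) acc
      = acc ++ (PySem.List.enumerate gs s).filterMap
          (fun ig => if (ig.2.contains cmpt || nb.any (fun h => ig.2.contains h)) then some ig.1 else none) := by
  induction gs generalizing s acc with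
  | nil => simp [PySem.List.enumerate_nil]
  | cons g t ih =>
    rw [PySem.List.enumerate_cons]
    simp only [List.foldl_cons, List.filterMap_cons]
    have hfresh : s ∉ acc := fun h => absurd (hacc s h) (lt_irrefl s)
    rw [step_eq nb g cmpt s acc hfresh]
    by_cases hc : (g.contains cmpt || nb.any (fun h => g.contains h)) = true
    · rw [if_pos hc, if_pos hc, ih (s + 1) (acc ++ [s]) ?_]
      · simp
      · intro j hj
        rcases List.mem_append.1 hj with hj | hj
        · exact lt_trans (hacc j hj) (by omega)
        · simp at hj; omega
    · rw [if_neg hc, if_neg hc, ih (s + 1) acc (fun j hj => lt_trans (hacc j hj) (by omega))]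

-- B-side: membership in one group's pass over the index
theorem idx_inner_mem (g : List String) (i j : Int) (node : String)
    (d : PySem.Dict String (PySem.Set Int)) :
    j ∈ (g.foldl (fun d n => d.modify n PySem.Set.empty (fun s => PySem.Set.add s i)) d).getD node PySem.Set.empty
      ↔ j ∈ d.getD node PySem.Set.empty ∨ (j = i ∧ node ∈ g) := by
  induction g generalizing d with
  | nil => simp
  | cons h t ih =>
    rw [List.foldl_cons, ih, PySem.Dict.getD_modify]
    by_cases hn : node = h
    · subst hn
      rw [if_pos rfl]
      simp [PySem.Set.mem_add]
      tauto
    · rw [if_neg hn]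
      simp [hn]

-- B-side: membership in the finished inverted index
theorem idx_mem (gs : List (List String)) (s j : Int) (node : String)
    (d : PySem.Dict String (PySem.Set Int)) :
    j ∈ ((PySem.List.enumerate gs s).foldl
          (fun d ig =>
            ig.2.foldl (fun d n => d.modify n PySem.Set.empty (fun s' => PySem.Set.add s' ig.1)) d) d).getD node PySem.Set.empty
      ↔ j ∈ d.getD node PySem.Set.empty ∨ ∃ p ∈ PySem.List.enumerate gs s, p.1 = j ∧ node ∈ p.2 := by
  induction gs generalizing s d with
  | nil => simp [PySem.List.enumerate_nil]
  | cons g t ih =>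
    rw [PySem.List.enumerate_cons, List.foldl_cons, ih, idx_inner_mem]
    simp only [List.mem_cons]
    constructor
    · rintro ((h | ⟨rfl, hm⟩) | h)
      · exact Or.inl h
      · exact Or.inr ⟨(j, g), Or.inl rfl, rfl, hm⟩
      · rcases h with ⟨p, hp, hj, hm⟩
        exact Or.inr ⟨p, Or.inr hp, hj, hm⟩
    · rintro (h | ⟨p, hp | hp, hj, hm⟩)
      · exact Or.inl (Or.inl h)
      · subst hp
        exact Or.inl (Or.inr ⟨hj.symm, hm⟩)
      · exact Or.inr ⟨p, hp, hj, hm⟩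

-- B-side: membership in the union loop over the neighbors
theorem hits_mem (nb : List String) (idx : PySem.Dict String (PySem.Set Int))
    (s0 : PySem.Set Int) (j : Int) :
    j ∈ nb.foldl (fun s h => PySem.Set.union s (idx.getD h PySem.Set.empty)) s0
      ↔ j ∈ s0 ∨ ∃ h ∈ nb, j ∈ idx.getD h PySem.Set.empty := by
  induction nb generalizing s0 with
  | nil => simp
  | cons h t ih =>
    rw [List.foldl_cons, ih]
    simp only [PySem.Set.mem_union, List.mem_cons]
    constructor
    · rintro ((h1 | h1) | ⟨x, hx, hm⟩)
      · exact Or.inl h1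
      · exact Or.inr ⟨h, Or.inl rfl, h1⟩
      · exact Or.inr ⟨x, Or.inr hx, hm⟩
    · rintro (h1 | ⟨x, hx | hx, hm⟩)
      · exact Or.inl (Or.inl h1)
      · subst hx; exact Or.inl (Or.inr hm)
      · exact Or.inr ⟨x, hx, hm⟩

-- B-side: the union loop preserves Nodup
theorem hits_nodup (nb : List String) (idx : PySem.Dict String (PySem.Set Int))
    (s0 : PySem.Set Int) (h0 : s0.Nodup) :
    (nb.foldl (fun s h => PySem.Set.union s (idx.getD h PySem.Set.empty)) s0).Nodup := by
  induction nb generalizing s0 with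
  | nil => exact h0
  | cons h t ih =>
    rw [List.foldl_cons]
    exact ih _ (PySem.Set.nodup_union _ _ h0)

-- shared: every index yielded by the filterMap over an enumeration is ≥ the start
theorem filterMap_enum_lb (P : List String → Bool) (gs : List (List String)) (s j : Int)
    (hj : j ∈ (PySem.List.enumerate gs s).filterMap
      (fun ig => if P ig.2 then some ig.1 else none)) : s ≤ j := by
  induction gs generalizing s with
  | nil => simp [PySem.List.enumerate_nil] at hj
  | cons g t ih =>
    rw [PySem.List.enumerate_cons, List.filterMap_cons] at hj
    by_cases hp : P g = true
    · rw [if_pos hp] at hj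
      rcases List.mem_cons.1 hj with rfl | hj
      · exact le_refl j
      · exact le_trans (by omega) (ih (s + 1) hj)
    · rw [if_neg hp] at hj
      exact le_trans (by omega) (ih (s + 1) hj)

-- shared: the filterMap over an enumeration is strictly increasing
theorem filterMap_enum_pairwise (P : List String → Bool) (gs : List (List String)) (s : Int) :
    ((PySem.List.enumerate gs s).filterMap
      (fun ig => if P ig.2 then some ig.1 else none)).Pairwise (· < ·) := by
  induction gs generalizing s with
  | nil => simp [PySem.List.enumerate_nil]
  | cons g t ih =>
    rw [PySem.List.enumerate_cons, List.filterMap_cons]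
    by_cases hp : P g = true
    · rw [if_pos hp]
      refine List.pairwise_cons.2 ⟨fun j hj => ?_, ih (s + 1)⟩
      have := filterMap_enum_lb P t (s + 1) j hj
      omega
    · rw [if_neg hp]
      exact ih (s + 1)

-- shared: membership in the filterMap over an enumeration
theorem filterMap_enum_mem (P : List String → Bool) (gs : List (List String)) (s j : Int) :
    j ∈ (PySem.List.enumerate gs s).filterMap
        (fun ig => if P ig.2 then some ig.1 else none)
      ↔ ∃ p ∈ PySem.List.enumerate gs s, p.1 = j ∧ P p.2 = true := by
  simp only [List.mem_filterMap, Option.ite_none_right_eq_some, Option.some.injEq]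
  constructor
  · rintro ⟨p, hp, hP, hj⟩; exact ⟨p, hp, hj, hP⟩
  · rintro ⟨p, hp, hj, hP⟩; exact ⟨p, hp, hP, hj⟩

-- ===== VERDICT (by name: the statement is the Claim_ definition above) =====
theorem exists_in_spec : Claim_equal_exists_in := by
  intro groups graph cmpt _ _
  unfold Spec_exists_in exists_in exists_in_alt
  by_cases hg : groups.isEmpty
  · rw [List.isEmpty_iff] at hg
    simp [hg, PySem.List.enumerate_nil]
  · rw [if_neg hg]
    set nb : List String := (graph.lookup cmpt).getD [] with hnb
    rw [outer_loop_eq nb cmpt groups 0 [] (by simp), List.nil_append]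
    set P : List String → Bool := fun g => (g.contains cmpt || nb.any (fun h => g.contains h)) with hP
    set T : List Int := (PySem.List.enumerate groups).filterMap
      (fun ig => if P ig.2 then some ig.1 else none) with hT
    set index : PySem.Dict String (PySem.Set Int) :=
      (PySem.List.enumerate groups).foldl
        (fun d ig =>
          ig.2.foldl (fun d node => d.modify node PySem.Set.empty (fun s => PySem.Set.add s ig.1)) d)
        PySem.Dict.empty with hidx
    set hits : PySem.Set Int :=
      nb.foldl (fun s h => PySem.Set.union s (index.getD h PySem.Set.empty))
        (PySem.Set.ofList (index.getD cmpt PySem.Set.empty)) with hh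
    have hTpair : T.Pairwise (· < ·) := filterMap_enum_pairwise P groups 0
    have hTnd : T.Nodup := hTpair.imp (fun h => ne_of_lt h)
    have hHnd : hits.Nodup := hits_nodup nb index _ (PySem.Set.nodup_ofList _)
    have hidxmem : ∀ (node : String) (j : Int),
        j ∈ index.getD node PySem.Set.empty
          ↔ ∃ p ∈ PySem.List.enumerate groups, p.1 = j ∧ node ∈ p.2 := by
      intro node j
      rw [hidx, idx_mem]
      simp [PySem.Dict.getD_empty]
    have hmem : ∀ j, j ∈ T ↔ j ∈ hits := by
      intro j
      rw [hT, filterMap_enum_mem, hh, hits_mem, PySem.Set.mem_ofList, hidxmem]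
      constructor
      · rintro ⟨p, hp, hj, hcond⟩
        simp only [hP] at hcond
        rcases Bool.or_eq_true_iff.1 hcond with hc | hc
        · exact Or.inl ⟨p, hp, hj, by simpa [List.contains_iff_mem] using hc⟩
        · rcases List.any_eq_true.1 hc with ⟨h, hhnb, hcg⟩
          exact Or.inr ⟨h, hhnb, (hidxmem h j).2 ⟨p, hp, hj, by simpa [List.contains_iff_mem] using hcg⟩⟩
      · rintro (⟨p, hp, hj, hm⟩ | ⟨h, hhnb, hjh⟩)
        · refine ⟨p, hp, hj, ?_⟩
          simp only [hP]
          have : p.2.contains cmpt = true := by simpa [List.contains_iff_mem] using hm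
          rw [this, Bool.true_or]
        · rcases (hidxmem h j).1 hjh with ⟨p, hp, hj, hm⟩
          refine ⟨p, hp, hj, ?_⟩
          simp only [hP]
          have : (nb.any fun x => p.2.contains x) = true :=
            List.any_eq_true.2 ⟨h, hhnb, by simpa [List.contains_iff_mem] using hm⟩
          rw [this, Bool.or_true]
    have hperm : T.Perm hits := (List.perm_ext_iff_of_nodup hTnd hHnd).2 hmem
    exact (PySem.List.sorted_eq_of_perm_of_pairwise_lt _ _ _ hperm hTpair).symm
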